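-- pv_equiv track=rewrite | github.com/pypi-data/pypi-mirror-90 | packages/light-character/light_character-0.1.0-py2.py3-none-any.whl/light_character/light_character.py | collapse_states
-- ===== SOURCE A (Python) =====
-- def collapse_states(states):
--     """
--     Given a list of light states, collapse any adjacent entries that have the
--     same state.
--
--     If there are no adjacent matching states, there is no change to the output
--
--     >>> collapse_states([('R',1), ('Y', 1), ('R', 1)])
--     [('R', 1), ('Y', 1), ('R', 1)]
--
--     Adjacent states are collapsed, summing their durations
--
--     >>> collapse_states([('R',1), ('R', 1), ('Y', 1)])
--     [('R', 2), ('Y', 1)]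
--
--     >>> collapse_states([('R',1), ('R', 2), ('R', 3), ('Y', 1)])
--     [('R', 6), ('Y', 1)]
--     """
--     new_states = states[:1]
--
--     for state in states[1:]:
--         last_state = new_states[-1]
--         if state[0] == last_state[0]:
--             new_states[-1] = (state[0], last_state[1] + state[1])
--         else:
--             new_states.append(state)
--     return new_states
-- ===== SOURCE B (Python) =====
-- def _merge_halves(left, right):
--     """Concatenate two already-collapsed lists, merging the one possible seam."""
--     if left and right and left[-1][0] == right[0][0]:
--         return left[:-1] + [(right[0][0], left[-1][1] + right[0][1])] + right[1:]
--     return left + right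
--
--
-- def collapse_states(states):
--     if len(states) <= 1:
--         return list(states)
--     mid = len(states) // 2
--     return _merge_halves(collapse_states(states[:mid]), collapse_states(states[mid:]))
-- ===== Notes on version B (the rewrite author's own statement) =====
-- stated objective: alternative
-- what changed: Replaces the single-pass merge-into-last-element loop by a divide-and-conquer recursion: split the list in half, collapse each half recursively, then join the halves with a single seam merge.
import Mathlib
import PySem

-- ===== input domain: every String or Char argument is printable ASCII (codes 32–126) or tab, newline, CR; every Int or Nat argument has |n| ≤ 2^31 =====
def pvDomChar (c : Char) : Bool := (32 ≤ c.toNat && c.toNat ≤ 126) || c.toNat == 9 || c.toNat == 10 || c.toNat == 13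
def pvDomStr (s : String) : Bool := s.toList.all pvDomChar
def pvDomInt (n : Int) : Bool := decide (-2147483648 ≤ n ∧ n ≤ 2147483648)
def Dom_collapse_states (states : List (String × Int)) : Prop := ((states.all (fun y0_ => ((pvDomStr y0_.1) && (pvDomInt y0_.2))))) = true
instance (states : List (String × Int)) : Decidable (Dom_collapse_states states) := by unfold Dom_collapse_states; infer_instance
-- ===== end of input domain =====

-- B replaces A's single-pass merge-into-last-element loop by a divide-and-conquer
-- recursion (collapse each half, then merge the one possible seam); alternative
-- decomposition, same results.

-- ===== PORT A =====
-- loop body: last_state = new_states[-1]; merge or append.  The `none` branch is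
-- unreachable (the accumulator starts as states[:1], nonempty whenever the loop runs).
def collapse_states_step (acc : List (String × Int)) (state : String × Int) : List (String × Int) :=
  match acc.getLast? with
  | some last_state =>
    if state.1 == last_state.1 then
      acc.dropLast ++ [(state.1, last_state.2 + state.2)]
    else
      acc ++ [state]
  | none => acc ++ [state]

def collapse_states (states : List (String × Int)) : List (String × Int) :=
  (states.drop 1).foldl collapse_states_step (states.take 1)

-- ===== PORT B =====
-- _merge_halves: concatenate two collapsed halves, merging the one possible seam
-- (left[-1] and right[0] share a label).  The `none`/`[]` arms are `left + right`.
def merge_halves (left right : List (String × Int)) : List (String × Int) :=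
  match left.getLast?, right with
  | some last, (k, v) :: rt =>
    if last.1 == k then left.dropLast ++ (k, last.2 + v) :: rt else left ++ right
  | _, _ => left ++ right

def collapse_states_alt (states : List (String × Int)) : List (String × Int) :=
  if states.length ≤ 1 then
    states
  else
    let mid := states.length / 2
    merge_halves (collapse_states_alt (states.take mid)) (collapse_states_alt (states.drop mid))
termination_by states.length
decreasing_by
  · rename_i h
    simp only [List.length_take]
    exact Nat.lt_of_le_of_lt (Nat.min_le_left _ _)
      (Nat.div_lt_self (Nat.lt_trans Nat.zero_lt_one (Nat.lt_of_not_le h)) Nat.one_lt_two)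
  · rename_i h
    simp only [List.length_drop]
    exact Nat.sub_lt (Nat.lt_trans Nat.zero_lt_one (Nat.lt_of_not_le h))
      (Nat.div_pos (Nat.lt_of_not_le h) Nat.zero_lt_two)

-- ===== PRECONDITION & SPEC =====
def Spec_collapse_states (states : List (String × Int)) (out : List (String × Int)) : Prop := out = collapse_states_alt states
instance (states : List (String × Int)) (out : List (String × Int)) : Decidable (Spec_collapse_states states out) := by unfold Spec_collapse_states; infer_instance

-- ===== CLAIM (what is proved, stated in full; the proofs are below) =====
def Claim_equal_collapse_states : Prop := ∀ (states : List (String × Int)), Dom_collapse_states states → Spec_collapse_states states (collapse_states states)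

-- ===== LEMMAS AND PROOFS =====

-- mergeRun k v xs: the state of A's loop after the accumulator's last element is (k,v)
-- and the remaining input is xs (proof-only).
def mergeRun : String → Int → List (String × Int) → List (String × Int)
  | k, v, [] => [(k, v)]
  | k, v, (k', v') :: rest =>
    if k' == k then mergeRun k (v + v') rest else (k, v) :: mergeRun k' v' rest

-- canonical collapsed form (proof-only)
def collapseSpec : List (String × Int) → List (String × Int)
  | [] => []
  | (k, v) :: rest => mergeRun k v rest

theorem foldl_step_eq_mergeRun (xs : List (String × Int)) :
    ∀ (pre : List (String × Int)) (k : String) (v : Int),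
      xs.foldl collapse_states_step (pre ++ [(k, v)]) = pre ++ mergeRun k v xs := by
  induction xs with
  | nil => intro pre k v; simp [mergeRun]
  | cons hd tl ih =>
    intro pre k v
    obtain ⟨k', v'⟩ := hd
    simp only [List.foldl_cons, collapse_states_step, List.getLast?_concat,
      List.dropLast_concat, mergeRun]
    split_ifs with h
    · have hk : k' = k := eq_of_beq h
      subst hk
      exact ih pre k' (v + v')
    · rw [show pre ++ [(k, v)] ++ [(k', v')] = (pre ++ [(k, v)]) ++ [(k', v')] from rfl,
        ih (pre ++ [(k, v)]) k' v']
      simp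

theorem collapse_states_eq_spec (states : List (String × Int)) :
    collapse_states states = collapseSpec states := by
  match states with
  | [] => rfl
  | (k, v) :: rest =>
    show rest.foldl collapse_states_step ([] ++ [(k, v)]) = _
    rw [foldl_step_eq_mergeRun rest [] k v]
    simp [collapseSpec]

-- mergeRun starts with its seed label, and shifting the seed duration shifts only the head.
theorem mergeRun_shift (xs : List (String × Int)) : ∀ (k : String) (b : Int),
    ∃ d t, mergeRun k b xs = (k, d) :: t ∧ ∀ a : Int, mergeRun k (a + b) xs = (k, a + d) :: t := by
  induction xs with
  | nil => intro k b; exact ⟨b, [], rfl, fun a => rfl⟩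
  | cons hd tl ih =>
    intro k b
    obtain ⟨k', v'⟩ := hd
    by_cases h : (k' == k) = true
    · obtain ⟨d, t, h1, h2⟩ := ih k (b + v')
      refine ⟨d, t, ?_, fun a => ?_⟩
      · simpa [mergeRun, h] using h1
      · have := h2 a
        simpa [mergeRun, h, add_assoc] using this
    · exact ⟨b, mergeRun k' v' tl, by simp [mergeRun, h], fun a => by simp [mergeRun, h]⟩

theorem merge_halves_cons (p : String × Int) (L R : List (String × Int)) (h : L ≠ []) :
    merge_halves (p :: L) R = p :: merge_halves L R := by
  obtain ⟨l0, L', rfl⟩ := List.exists_cons_of_ne_nil h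
  cases R with
  | nil => simp [merge_halves]
  | cons r rt =>
    obtain ⟨rk, rv⟩ := r
    cases hx : (l0 :: L').getLast? with
    | none => simp at hx
    | some last =>
      simp only [merge_halves, List.getLast?_cons_cons, hx]
      split_ifs with hk
      · simp [List.dropLast_cons_of_ne_nil]
      · simp

-- core: A's loop over a concatenation = seam-merge of the two collapsed parts
theorem mergeRun_append (xs : List (String × Int)) :
    ∀ (k : String) (v : Int) (ys : List (String × Int)),
      mergeRun k v (xs ++ ys) = merge_halves (mergeRun k v xs) (collapseSpec ys) := by
  induction xs with
  | nil =>
    intro k v ys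
    cases ys with
    | nil => simp [mergeRun, collapseSpec, merge_halves]
    | cons y yt =>
      obtain ⟨k', v'⟩ := y
      obtain ⟨d, t, h1, h2⟩ := mergeRun_shift yt k' v'
      simp only [List.nil_append, collapseSpec, mergeRun, h1]
      by_cases h : (k' == k) = true
      · have hk : k' = k := eq_of_beq h
        subst hk
        rw [h2 v]
        simp [merge_halves]
      · have hk2 : (k == k') = false :=
          beq_eq_false_iff_ne.mpr (fun e => h (by simp [e]))
        simp [merge_halves, hk2]
        intro e
        exact absurd (by simp [e]) h
  | cons hd tl ih =>
    intro k v ys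
    obtain ⟨k2, v2⟩ := hd
    by_cases h : (k2 == k) = true
    · simp only [List.cons_append, mergeRun, h, if_pos]
      exact ih k (v + v2) ys
    · simp only [List.cons_append, mergeRun, h, if_neg, Bool.false_eq_true,
        not_false_eq_true]
      rw [ih k2 v2 ys]
      obtain ⟨d, t, h1, _⟩ := mergeRun_shift tl k2 v2
      rw [merge_halves_cons _ _ _ (by simp [h1])]

theorem collapseSpec_append (xs ys : List (String × Int)) :
    collapseSpec (xs ++ ys) = merge_halves (collapseSpec xs) (collapseSpec ys) := by
  cases xs with
  | nil => cases ys with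
    | nil => rfl
    | cons y yt => simp [collapseSpec, merge_halves]
  | cons x xt =>
    obtain ⟨k, v⟩ := x
    simpa [collapseSpec] using mergeRun_append xt k v ys

theorem alt_eq_spec (states : List (String × Int)) :
    collapse_states_alt states = collapseSpec states := by
  rw [collapse_states_alt]
  by_cases h : states.length ≤ 1
  · rw [if_pos h]
    match states, h with
    | [], _ => rfl
    | [(k, v)], _ => simp [collapseSpec, mergeRun]
  · rw [if_neg h]
    show merge_halves (collapse_states_alt (states.take (states.length / 2)))
        (collapse_states_alt (states.drop (states.length / 2))) = _
    have h1 := alt_eq_spec (states.take (states.length / 2))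
    have h2 := alt_eq_spec (states.drop (states.length / 2))
    rw [h1, h2, ← collapseSpec_append, List.take_append_drop]
termination_by states.length
decreasing_by
  · simp only [List.length_take]; omega
  · simp only [List.length_drop]; omega

-- ===== VERDICT (by name: the statement is the Claim_ definition above) =====
theorem collapse_states_spec : Claim_equal_collapse_states := by
  intro states _
  unfold Spec_collapse_states
  rw [collapse_states_eq_spec, alt_eq_spec]
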